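-- pv_equiv track=rewrite | github.com/abhinavamirtharaj-cpu/Vit-science-project- | emotion_analyzer.py | has_negation
-- ===== SOURCE A (Python) =====
-- NEGATION_WORDS = {'not', 'no', 'never', 'neither', 'nobody', 'nothing', 'nowhere',
--                   'none', 'hardly', 'scarcely', 'barely', 'don\'t', 'doesn\'t',
--                   'didn\'t', 'won\'t', 'wouldn\'t', 'shouldn\'t', 'can\'t', 'cannot',
--                   'isn\'t', 'aren\'t', 'wasn\'t', 'weren\'t', 'haven\'t', 'hasn\'t', 'hadn\'t'}
--
-- def has_negation(text, keyword):
--     """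
--     Check if a keyword is negated in the text.
--     Returns True if the keyword appears within 3 words after a negation word.
--     """
--     text_lower = text.lower()
--     words = text_lower.split()
--
--     try:
--         keyword_index = None
--         for i, word in enumerate(words):
--             if keyword in word:
--                 keyword_index = i
--                 break
--
--         if keyword_index is None:
--             return False
--
--         # Check 3 words before the keyword
--         for i in range(max(0, keyword_index - 3), keyword_index):
--             if words[i] in NEGATION_WORDS:
--                 return True
--
--         return False
--     except:
--         return False
-- ===== SOURCE B (Python) =====
-- NEGATION_WORDS = {'not', 'no', 'never', 'neither', 'nobody', 'nothing', 'nowhere',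
--                   'none', 'hardly', 'scarcely', 'barely', 'don\'t', 'doesn\'t',
--                   'didn\'t', 'won\'t', 'wouldn\'t', 'shouldn\'t', 'can\'t', 'cannot',
--                   'isn\'t', 'aren\'t', 'wasn\'t', 'weren\'t', 'haven\'t', 'hasn\'t', 'hadn\'t'}
--
--
-- def has_negation(text, keyword):
--     """Single pass: keep a buffer of the (at most) 3 words strictly preceding
--     the current word; at the first word containing the keyword, answer from
--     the buffer."""
--     last3 = []
--     for word in text.lower().split():
--         if keyword in word:
--             return any(w in NEGATION_WORDS for w in last3)
--         last3.append(word)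
--         if len(last3) > 3:
--             last3.pop(0)
--     return False
-- ===== Notes on version B (the rewrite author's own statement) =====
-- stated objective: simpler
-- what changed: A two-phase scan (find the index of the first keyword word, then re-index the words list over range(max(0,i-3),i)) is replaced by a single pass that maintains a bounded buffer of the 3 strictly preceding words and answers from the buffer at the first keyword hit, with no indexing and no try/except.
import Mathlib
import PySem

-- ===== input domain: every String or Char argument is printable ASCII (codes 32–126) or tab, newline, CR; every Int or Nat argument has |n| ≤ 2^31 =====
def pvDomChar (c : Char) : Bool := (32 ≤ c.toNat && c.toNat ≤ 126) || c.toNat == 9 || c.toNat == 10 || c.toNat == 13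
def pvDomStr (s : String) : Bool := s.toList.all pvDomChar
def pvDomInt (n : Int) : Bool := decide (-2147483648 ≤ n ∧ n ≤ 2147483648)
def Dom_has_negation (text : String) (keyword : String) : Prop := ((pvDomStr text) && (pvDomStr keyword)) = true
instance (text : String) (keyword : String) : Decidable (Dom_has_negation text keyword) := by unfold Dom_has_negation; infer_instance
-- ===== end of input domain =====

-- B: single pass with a bounded buffer of the 3 preceding words, instead of A's
-- find-index-then-rescan-window; same return value (objective: simpler).


-- ===== PORT A =====
def negationWords : List String :=
  ["not", "no", "never", "neither", "nobody", "nothing", "nowhere",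
   "none", "hardly", "scarcely", "barely", "don't", "doesn't",
   "didn't", "won't", "wouldn't", "shouldn't", "can't", "cannot",
   "isn't", "aren't", "wasn't", "weren't", "haven't", "hasn't", "hadn't"]

-- the 'for i, word in enumerate(words): if keyword in word: keyword_index = i; break' loop
def findKwIdx (keyword : String) : List String → Int → Option Int
  | [], _ => none
  | w :: ws, i => if PySem.Str.isIn keyword w then some i else findKwIdx keyword ws (i + 1)

-- the 'for i in range(max(0, keyword_index - 3), keyword_index): if words[i] in NEGATION_WORDS: return True' loop;
-- an out-of-range words[i] would raise IndexError, caught by the bare except returning False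
def checkNegLoop (words : List String) : List Int → Bool
  | [] => false
  | i :: rest =>
    match PySem.List.pyGet? words i with
    | none => false
    | some w => if negationWords.contains w then true else checkNegLoop words rest

def has_negation (text : String) (keyword : String) : Bool :=
  let words := PySem.Str.split₀ (PySem.Str.lower text)
  match findKwIdx keyword words 0 with
  | none => false
  | some ki => checkNegLoop words (PySem.List.pyRange (max 0 (ki - 3)) ki 1)

-- ===== PORT B =====
def altLoop (keyword : String) (last3 : List String) : List String → Bool
  | [] => false
  | w :: ws =>
    if PySem.Str.isIn keyword w then last3.any (fun x => negationWords.contains x)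
    else
      let b := last3 ++ [w]
      altLoop keyword (if b.length > 3 then b.drop 1 else b) ws

def has_negation_alt (text : String) (keyword : String) : Bool :=
  altLoop keyword [] (PySem.Str.split₀ (PySem.Str.lower text))

-- ===== PRECONDITION & SPEC =====
def Spec_has_negation (text : String) (keyword : String) (out : Bool) : Prop := out = has_negation_alt text keyword
instance (text : String) (keyword : String) (out : Bool) : Decidable (Spec_has_negation text keyword out) := by unfold Spec_has_negation; infer_instance

-- ===== CLAIM (what is proved, stated in full; the proofs are below) =====
def Claim_equal_has_negation : Prop := ∀ (text : String) (keyword : String), Dom_has_negation text keyword → Spec_has_negation text keyword (has_negation text keyword)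

-- ===== LEMMAS AND PROOFS =====

-- A's window scan over range(a, b) with in-range indices is an `any` over the slice words[a:b]
lemma checkNegLoop_window (words : List String) (a b : Nat) (hb : b ≤ words.length) :
    checkNegLoop words (PySem.List.pyRange (a : Int) (b : Int) 1) =
      ((words.take b).drop a).any (fun w => negationWords.contains w) := by
  induction hd : b - a generalizing a with
  | zero =>
    have hba : b ≤ a := by omega
    rw [PySem.List.pyRange_one_eq_nil (by exact_mod_cast hba)]
    simp [checkNegLoop, List.drop_eq_nil_of_le, hba]
  | succ n ih =>
    have hab : a < b := by omega
    rw [PySem.List.pyRange_one_cons (by exact_mod_cast hab)]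
    have ha : a < words.length := lt_of_lt_of_le hab hb
    have hget : PySem.List.pyGet? words (a : Int) = some (words[a]) := by
      simp [PySem.List.pyGet?, PySem.List.pyIdx?, ha]
    have hdrop : (words.take b).drop a = words[a] :: ((words.take b).drop (a + 1)) := by
      rw [List.drop_eq_getElem_cons (by simp; omega)]
      simp
    have : ((a : Int) + 1) = ((a + 1 : Nat) : Int) := by push_cast; ring
    rw [checkNegLoop, hget, this, ih (a + 1) (by omega), hdrop]
    cases h : negationWords.contains words[a] <;> simp

lemma altLoop_eq_find (keyword : String) (ws pre : List String)
    (hpre : ∀ w ∈ pre, PySem.Str.isIn keyword w = false) :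
    altLoop keyword (pre.drop (pre.length - 3)) ws =
      (match findKwIdx keyword ws (pre.length : Int) with
       | none => false
       | some ki => checkNegLoop (pre ++ ws) (PySem.List.pyRange (max 0 (ki - 3)) ki 1)) := by
  induction ws generalizing pre with
  | nil => simp [altLoop, findKwIdx]
  | cons w ws ih =>
    by_cases hk : PySem.Str.isIn keyword w
    · rw [altLoop, if_pos hk, findKwIdx, if_pos hk]
      show ((pre.drop (pre.length - 3)).any fun x => negationWords.contains x) =
        checkNegLoop (pre ++ w :: ws)
          (PySem.List.pyRange (max 0 ((pre.length : Int) - 3)) (pre.length : Int) 1)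
      have hmax : max 0 ((pre.length : Int) - 3) = ((pre.length - 3 : Nat) : Int) := by
        omega
      rw [hmax, checkNegLoop_window (pre ++ (w :: ws)) (pre.length - 3) pre.length
            (by simp)]
      congr 1
      rw [List.take_append_of_le_length (by simp)]
      simp
    · rw [altLoop, if_neg hk, findKwIdx, if_neg hk]
      set pre' := pre ++ [w] with hpre'
      have hlen3 : (pre.drop (pre.length - 3)).length = pre.length - (pre.length - 3) := by
        simp
      have hbuf : (if (pre.drop (pre.length - 3) ++ [w]).length > 3
            then (pre.drop (pre.length - 3) ++ [w]).drop 1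
            else pre.drop (pre.length - 3) ++ [w]) = pre'.drop (pre'.length - 3) := by
        have hdw : pre.drop (pre.length - 3) ++ [w] = pre'.drop (pre.length - 3) := by
          rw [hpre', List.drop_append_of_le_length (by omega)]
        by_cases h3 : pre.length ≥ 3
        · rw [if_pos (by simp [hlen3]; omega), hdw, List.drop_drop]
          congr 1
          simp [hpre']; omega
        · rw [if_neg (by simp [hlen3]; omega), hdw]
          congr 1
          simp [hpre']; omega
      have hpreh : ∀ x ∈ pre', PySem.Str.isIn keyword x = false := by
        intro x hx
        rcases List.mem_append.mp hx with h | h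
        · exact hpre x h
        · simp at h; subst h; simpa using hk
      have hlen' : ((pre.length : Int) + 1) = ((pre'.length : Nat) : Int) := by
        simp [hpre']
      dsimp only
      show altLoop keyword
          (if (pre.drop (pre.length - 3) ++ [w]).length > 3
            then (pre.drop (pre.length - 3) ++ [w]).drop 1
            else pre.drop (pre.length - 3) ++ [w]) ws =
        (match findKwIdx keyword ws ((pre.length : Int) + 1) with
         | none => false
         | some ki => checkNegLoop (pre ++ w :: ws) (PySem.List.pyRange (max 0 (ki - 3)) ki 1))
      rw [hbuf, hlen', ih pre' hpreh]
      simp [hpre']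

-- ===== VERDICT (by name: the statement is the Claim_ definition above) =====
theorem has_negation_spec : Claim_equal_has_negation := by
  intro text keyword _
  unfold Spec_has_negation has_negation has_negation_alt
  have h := altLoop_eq_find keyword (PySem.Str.split₀ (PySem.Str.lower text)) []
    (by intro w hw; simp at hw)
  simp only [List.length_nil, Nat.zero_sub, List.drop_nil, Nat.cast_zero, List.nil_append] at h
  rw [h]
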